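-- pv_equiv track=rewrite | github.com/Deskuma/dkmath | lean/dk_math/docs/dev/FLT-BAFCT-260401-v0/temp_scripts/cyclotomic_descent.py | power_in_cyclotomic
-- ===== SOURCE A (Python) =====
-- def multiply_in_cyclotomic(A, B, p=5):
--     """Multiply two elements of Z[ζ_p] represented as coefficient lists."""
--     # A = [a0, a1, ..., a_{p-2}], B = [b0, b1, ..., b_{p-2}]
--     n = p - 1
--     C = [0] * (2 * n - 1)
--     for i in range(n):
--         for j in range(n):
--             C[i + j] += A[i] * B[j]
--     # Reduce using ζ^{p-1} = -ζ^{p-2} - ... - ζ - 1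
--     result = list(C[:n])
--     for k in range(n, len(C)):
--         # ζ^k = ζ^{k mod cycle} but need reduction
--         # ζ^{p-1} = -1 - ζ - ζ^2 - ... - ζ^{p-2}
--         # More generally: ζ^{p-1+m} = ζ^m · ζ^{p-1} = -ζ^m (1 + ζ + ... + ζ^{p-2})
--         # Actually simpler: just reduce one step at a time
--         # ζ^{p-1} = -(1 + ζ + ... + ζ^{p-2})
--         excess = C[k]
--         for i in range(n):
--             result[i] -= excess
--     return result
--
-- def power_in_cyclotomic(A, exp, p=5):
--     """Compute A^exp in Z[ζ_p]."""
--     n = p - 1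
--     result = [0] * n
--     result[0] = 1  # identity = 1
--     base = list(A)
--     while exp > 0:
--         if exp % 2 == 1:
--             result = multiply_in_cyclotomic(result, base, p)
--         base = multiply_in_cyclotomic(base, base, p)
--         exp //= 2
--     return result
-- ===== SOURCE B (Python) =====
-- def multiply_in_cyclotomic(A, B, p=5):
--     """Multiply in Z[zeta_p] with the same quirky reduction, computed per coefficient:
--     result[i] = conv(i) - T where T is the total of the high convolution coefficients."""
--     n = p - 1
--     def conv(m):
--         return sum(A[i] * B[m - i] for i in range(max(0, m - n + 1), min(n, m + 1)))
--     T = sum(conv(k) for k in range(n, 2 * n - 1))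
--     return [conv(i) - T for i in range(n)]
--
-- def power_in_cyclotomic(A, exp, p=5):
--     """Compute A^exp in Z[zeta_p]: strip trailing zero bits by squaring, seed the
--     accumulator from the first odd-position square, then recurse over the rest."""
--     n = p - 1
--     if exp <= 0:
--         return [1] + [0] * (n - 1)
--     sq, e = list(A), exp
--     while e % 2 == 0:
--         sq = multiply_in_cyclotomic(sq, sq, p)
--         e //= 2
--     def rec(acc, s, r):
--         if r <= 0:
--             return acc
--         if r % 2 == 1:
--             acc = multiply_in_cyclotomic(acc, s, p)
--         return rec(acc, multiply_in_cyclotomic(s, s, p), r // 2)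
--     return rec(sq[:n], multiply_in_cyclotomic(sq, sq, p), e // 2)
-- ===== Notes on version B (the rewrite author's own statement) =====
-- stated objective: alternative
-- what changed: The helper multiplication is rewritten in closed form per output coefficient (result[i] = conv(i) - T, with the high convolution total T computed once) instead of filling a mutable 2n-1 convolution array and running staged subtraction passes; power_in_cyclotomic becomes a strip-trailing-zero-bits phase that squares the base, seeds the accumulator from the first odd-position square (skipping the identity multiplication), and a recursion over the remaining bits instead of A's fused while-loop starting from the identity.
import Mathlib
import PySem

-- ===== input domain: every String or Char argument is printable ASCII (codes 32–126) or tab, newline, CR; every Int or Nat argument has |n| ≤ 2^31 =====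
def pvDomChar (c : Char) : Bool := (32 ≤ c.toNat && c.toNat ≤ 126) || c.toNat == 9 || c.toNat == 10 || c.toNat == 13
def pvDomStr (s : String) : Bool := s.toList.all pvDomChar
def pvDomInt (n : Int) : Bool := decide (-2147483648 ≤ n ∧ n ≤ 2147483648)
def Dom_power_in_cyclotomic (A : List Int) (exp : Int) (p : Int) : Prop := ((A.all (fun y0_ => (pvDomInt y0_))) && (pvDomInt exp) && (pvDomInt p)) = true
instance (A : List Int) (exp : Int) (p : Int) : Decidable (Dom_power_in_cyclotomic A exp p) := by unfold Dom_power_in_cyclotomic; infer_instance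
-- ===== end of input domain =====

-- B rewrites the helper multiplication in closed form per coefficient (conv(i) - T with the
-- high-convolution total T computed once) and restructures the power as strip-trailing-zero-bits
-- + a recursion seeded from the first odd-position square. Objective: alternative.

-- ===== PORT A =====
-- literal port of multiply_in_cyclotomic (mutable C array, staged reduction passes);
-- list indexing via getD: Pre_ keeps the Python reads in range exactly where it does not raise
def multiplyCyc (A B : List Int) (p : Int) : List Int :=
  let n := (p - 1).toNat
  let C0 : List Int := List.replicate (2 * n - 1) 0
  let C := (List.range n).foldl (fun C i =>
      (List.range n).foldl (fun C j =>
        C.set (i + j) (C.getD (i + j) 0 + A.getD i 0 * B.getD j 0)) C) C0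
  let result := C.take n
  (List.range' n (C.length - n)).foldl (fun r k =>
      let excess := C.getD k 0
      (List.range n).foldl (fun r i => r.set i (r.getD i 0 - excess)) r) result

-- the while-loop of A, recursion on exp (halved each step)
def powLoopA (r base : List Int) (e : Int) (p : Int) : List Int :=
  if _h : 0 < e then
    let r' := if PySem.Int.mod e 2 = 1 then multiplyCyc r base p else r
    powLoopA r' (multiplyCyc base base p) (PySem.Int.floordiv e 2) p
  else r
termination_by e.toNat
decreasing_by
  rw [PySem.Int.floordiv_eq_ediv_of_pos (by norm_num)]
  omega

def power_in_cyclotomic (A : List Int) (exp : Int) (p : Int) : List Int :=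
  let n := (p - 1).toNat
  let result := (List.replicate n (0 : Int)).set 0 1
  powLoopA result A exp p

-- ===== PORT B =====
-- Source B helper: per-coefficient closed form, conv as a bounded sum, the high total T once
def convB (A B : List Int) (n m : Nat) : Int :=
  ((List.range' (m + 1 - n) (min n (m + 1) - (m + 1 - n))).map
    (fun i => A.getD i 0 * B.getD (m - i) 0)).sum

def multiplyCycB (A B : List Int) (p : Int) : List Int :=
  let n := (p - 1).toNat
  let T := ((List.range' n (2 * n - 1 - n)).map (fun k => convB A B n k)).sum
  (List.range n).map (fun i => convB A B n i - T)

-- Source B's while-loop stripping trailing zero bits of e (guard 0 < e totalizes; Source B reaches it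
-- only with positive e)
def stripB (sq : List Int) (e : Int) (p : Int) : List Int × Int :=
  if _h : 0 < e ∧ PySem.Int.mod e 2 = 0 then
    stripB (multiplyCycB sq sq p) (PySem.Int.floordiv e 2) p
  else (sq, e)
termination_by e.toNat
decreasing_by
  rw [PySem.Int.floordiv_eq_ediv_of_pos (by norm_num)]
  omega

-- Source B's rec over the remaining bits (r ≤ 0 returns the accumulator, as in Source B)
def recB (acc s : List Int) (r : Int) (p : Int) : List Int :=
  if _h : 0 < r then
    let acc' := if PySem.Int.mod r 2 = 1 then multiplyCycB acc s p else acc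
    recB acc' (multiplyCycB s s p) (PySem.Int.floordiv r 2) p
  else acc
termination_by r.toNat
decreasing_by
  rw [PySem.Int.floordiv_eq_ediv_of_pos (by norm_num)]
  omega

def power_in_cyclotomic_alt (A : List Int) (exp : Int) (p : Int) : List Int :=
  let n := (p - 1).toNat
  if exp ≤ 0 then 1 :: List.replicate (n - 1) 0
  else
    let se := stripB A exp p
    recB (PySem.List.slice se.1 none (some (p - 1))) (multiplyCycB se.1 se.1 p)
      (PySem.Int.floordiv se.2 2) p

-- ===== PRECONDITION & SPEC =====
-- Pre_ excludes exactly the inputs where the Python A raises IndexError: p ≤ 1 (result[0] = 1 on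
-- an empty list) and 0 < exp with A shorter than p-1 (out-of-range read in the helper).
def Pre_power_in_cyclotomic (A : List Int) (exp : Int) (p : Int) : Prop :=
  2 ≤ p ∧ (0 < exp → p - 1 ≤ (A.length : Int))
instance (A : List Int) (exp : Int) (p : Int) : Decidable (Pre_power_in_cyclotomic A exp p) := by
  unfold Pre_power_in_cyclotomic; infer_instance

def pvWitness_power_in_cyclotomic : List Int × Int × Int := ([1, 0, 2, -1], 3, 5)

def Spec_power_in_cyclotomic (A : List Int) (exp : Int) (p : Int) (out : List Int) : Prop := out = power_in_cyclotomic_alt A exp p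
instance (A : List Int) (exp : Int) (p : Int) (out : List Int) : Decidable (Spec_power_in_cyclotomic A exp p out) := by unfold Spec_power_in_cyclotomic; infer_instance

-- ===== CLAIM (what is proved, stated in full; the proofs are below) =====
def Claim_equal_power_in_cyclotomic : Prop := ∀ (A : List Int) (exp : Int) (p : Int), Dom_power_in_cyclotomic A exp p → Pre_power_in_cyclotomic A exp p → Spec_power_in_cyclotomic A exp p (power_in_cyclotomic A exp p)

-- ===== LEMMAS AND PROOFS =====

-- scatter-add: one inner pass of A's convolution fill, pointwise
lemma inner_fill (A B : List Int) (i : Nat) (J : List Nat) :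
    ∀ (C : List Int), (∀ j ∈ J, i + j < C.length) →
      (J.foldl (fun C j => C.set (i + j) (C.getD (i + j) 0 + A.getD i 0 * B.getD j 0)) C).length
          = C.length
      ∧ ∀ m, (J.foldl (fun C j =>
            C.set (i + j) (C.getD (i + j) 0 + A.getD i 0 * B.getD j 0)) C).getD m 0
          = C.getD m 0 + ((J.map (fun j => if i + j = m then A.getD i 0 * B.getD j 0 else 0)).sum) := by
  induction J with
  | nil => intro C _; simp
  | cons j J ih =>
      intro C hC
      have hj : i + j < C.length := hC j (by simp)
      have hlen : (C.set (i + j) (C.getD (i + j) 0 + A.getD i 0 * B.getD j 0)).length = C.length := by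
        simp
      obtain ⟨ihlen, ihget⟩ := ih (C.set (i + j) (C.getD (i + j) 0 + A.getD i 0 * B.getD j 0))
        (by intro j' hj'; rw [hlen]; exact hC j' (by simp [hj']))
      refine ⟨by simpa [hlen] using ihlen, ?_⟩
      intro m
      simp only [List.foldl_cons, List.map_cons, List.sum_cons]
      rw [ihget m]
      by_cases hm : i + j = m
      · subst hm
        have : (C.set (i + j) (C.getD (i + j) 0 + A.getD i 0 * B.getD j 0)).getD (i + j) 0
            = C.getD (i + j) 0 + A.getD i 0 * B.getD j 0 := by
          simp [List.getD, hj]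
        rw [this]; simp; ring
      · have : (C.set (i + j) (C.getD (i + j) 0 + A.getD i 0 * B.getD j 0)).getD m 0
            = C.getD m 0 := by
          simp [List.getD, List.getElem?_set_ne hm]
        rw [this]; simp [hm]

-- the full double fold of A's convolution fill, pointwise
lemma outer_fill (A B : List Int) (n : Nat) (I : List Nat) :
    ∀ (C : List Int), (∀ i ∈ I, ∀ j ∈ List.range n, i + j < C.length) →
      (I.foldl (fun C i => (List.range n).foldl (fun C j =>
          C.set (i + j) (C.getD (i + j) 0 + A.getD i 0 * B.getD j 0)) C) C).length = C.length
      ∧ ∀ m, (I.foldl (fun C i => (List.range n).foldl (fun C j =>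
          C.set (i + j) (C.getD (i + j) 0 + A.getD i 0 * B.getD j 0)) C) C).getD m 0
        = C.getD m 0 + ((I.map (fun i =>
            ((List.range n).map (fun j => if i + j = m then A.getD i 0 * B.getD j 0 else 0)).sum)).sum) := by
  induction I with
  | nil => intro C _; simp
  | cons i I ih =>
      intro C hC
      obtain ⟨hlen1, hget1⟩ := inner_fill A B i (List.range n) C (hC i (by simp))
      obtain ⟨hlen2, hget2⟩ := ih _ (by intro i' hi' j hj; rw [hlen1]; exact hC i' (by simp [hi']) j hj)
      refine ⟨by rw [List.foldl_cons, hlen2, hlen1], ?_⟩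
      intro m
      simp only [List.foldl_cons, List.map_cons, List.sum_cons]
      rw [hget2 m, hget1 m]; ring

-- a 0/else-ite sum over range n collapses to the single matching index
lemma ite_sum_range (v : Nat → Int) (i m : Nat) :
    ∀ n, ((List.range n).map (fun j => if i + j = m then v j else 0)).sum
      = if i ≤ m ∧ m - i < n then v (m - i) else 0 := by
  intro n
  induction n with
  | zero => simp
  | succ n ihn =>
      rw [List.range_succ]
      simp only [List.map_append, List.sum_append, List.map_cons, List.sum_cons, List.map_nil,
        List.sum_nil, ihn]
      by_cases h : i + n = m
      · have h1 : ¬ (i ≤ m ∧ m - i < n) := by omega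
        have h2 : i ≤ m ∧ m - i < n + 1 := by omega
        have h3 : m - i = n := by omega
        simp [h2, h, h3]
      · by_cases h4 : i ≤ m ∧ m - i < n
        · have h5 : i ≤ m ∧ m - i < n + 1 := by omega
          simp [h4, h5, h]
        · have h5 : ¬ (i ≤ m ∧ m - i < n + 1) := by omega
          rw [if_neg h4, if_neg h5, if_neg h]
          simp

-- B's bounded conv sum equals the full ite-sum over range n
lemma convB_eq_ite_sum (A B : List Int) (n m : Nat) :
    convB A B n m
      = ((List.range n).map (fun i =>
          if i ≤ m ∧ m - i < n then A.getD i 0 * B.getD (m - i) 0 else 0)).sum := by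
  unfold convB
  by_cases hempty : min n (m + 1) ≤ m + 1 - n
  · have h0 : min n (m + 1) - (m + 1 - n) = 0 := by omega
    rw [h0]
    simp only [List.range'_zero, List.map_nil, List.sum_nil]
    symm
    apply List.sum_eq_zero
    intro x hx
    simp only [List.mem_map, List.mem_range] at hx
    obtain ⟨i, hi, rfl⟩ := hx
    have : ¬ (i ≤ m ∧ m - i < n) := by omega
    simp [this]
  · rw [not_le] at hempty
    set lo := m + 1 - n with hlo
    set hi := min n (m + 1) with hhi
    have hsplit : List.range n = List.range' 0 lo ++ List.range' lo (hi - lo) ++ List.range' hi (n - hi) := by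
      have hA : List.range' 0 lo ++ List.range' lo (hi - lo) = List.range' 0 hi := by
        have h := List.range'_append_1 (s := 0) (m := lo) (n := hi - lo)
        rw [Nat.zero_add] at h
        rw [h]
        congr 1
        omega
      have hB : List.range' 0 hi ++ List.range' hi (n - hi) = List.range' 0 n := by
        have h := List.range'_append_1 (s := 0) (m := hi) (n := n - hi)
        rw [Nat.zero_add] at h
        rw [h]
        congr 1
        omega
      rw [List.range_eq_range', hA, hB]
    rw [hsplit]
    simp only [List.map_append, List.sum_append]
    have hleft : ((List.range' 0 lo).map (fun i =>
        if i ≤ m ∧ m - i < n then A.getD i 0 * B.getD (m - i) 0 else 0)).sum = 0 := by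
      apply List.sum_eq_zero
      intro x hx
      simp only [List.mem_map, List.mem_range'_1] at hx
      obtain ⟨i, hi', rfl⟩ := hx
      have : ¬ (i ≤ m ∧ m - i < n) := by omega
      simp [this]
    have hright : ((List.range' hi (n - hi)).map (fun i =>
        if i ≤ m ∧ m - i < n then A.getD i 0 * B.getD (m - i) 0 else 0)).sum = 0 := by
      apply List.sum_eq_zero
      intro x hx
      simp only [List.mem_map, List.mem_range'_1] at hx
      obtain ⟨i, hi', rfl⟩ := hx
      have : ¬ (i ≤ m ∧ m - i < n) := by omega
      simp [this]
    have hmid : (List.range' lo (hi - lo)).map (fun i =>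
        if i ≤ m ∧ m - i < n then A.getD i 0 * B.getD (m - i) 0 else 0)
        = (List.range' lo (hi - lo)).map (fun i => A.getD i 0 * B.getD (m - i) 0) := by
      apply List.map_congr_left
      intro i hi'
      simp only [List.mem_range'_1] at hi'
      have : i ≤ m ∧ m - i < n := by omega
      simp [this]
    rw [hleft, hright, hmid]
    ring

-- one subtraction pass of A, pointwise (set out of range is a no-op on both sides)
lemma sub_fold_getElem? (ex : Int) (J : List Nat) (hJ : J.Nodup) :
    ∀ (r : List Int) (i : Nat),
      (J.foldl (fun r i => r.set i (r.getD i 0 - ex)) r)[i]?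
        = if i ∈ J then (r[i]?).map (fun v => v - ex) else r[i]? := by
  induction J with
  | nil => intro r i; simp
  | cons j J ih =>
      intro r i
      simp only [List.foldl_cons]
      rw [ih (hJ.of_cons) _ i]
      by_cases hij : i = j
      · subst hij
        have hnot : i ∉ J := by
          intro h; exact (List.nodup_cons.mp hJ).1 h
        simp only [hnot, if_false, List.mem_cons, true_or, if_true]
        by_cases hlt : i < r.length
        · rw [List.getElem?_set_self' ]
          simp [List.getD, List.getElem?_eq_getElem hlt]
        · have h1 : r[i]? = none := by
            rw [List.getElem?_eq_none_iff]; omega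
          have h2 : (r.set i (r.getD i 0 - ex))[i]? = none := by
            rw [List.getElem?_eq_none_iff]; simp; omega
          rw [h2, h1]
          simp
      · have : (r.set j (r.getD j 0 - ex))[i]? = r[i]? := List.getElem?_set_ne (by omega)
        rw [this]
        by_cases hmem : i ∈ J <;> simp [hmem, hij]
  
-- one subtraction pass maps the whole list when its length is at most n
lemma sub_pass_map (ex : Int) (n : Nat) (r : List Int) (h : r.length ≤ n) :
    (List.range n).foldl (fun r i => r.set i (r.getD i 0 - ex)) r
      = r.map (fun v => v - ex) := by
  apply List.ext_getElem?
  intro i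
  rw [sub_fold_getElem? ex (List.range n) (List.nodup_range) r i]
  by_cases hi : i ∈ List.range n
  · simp [hi]
  · simp only [List.mem_range] at hi
    have h1 : r[i]? = none := by rw [List.getElem?_eq_none_iff]; omega
    have h2 : (r.map (fun v => v - ex))[i]? = none := by
      rw [List.getElem?_eq_none_iff]; simp; omega
    simp [List.mem_range, hi, h1, h2]

-- the whole chain of subtraction passes subtracts the total of the excesses
lemma sub_passes (n : Nat) (C : List Int) (ks : List Nat) :
    ∀ (r : List Int), r.length ≤ n →
      ks.foldl (fun r k =>
          (List.range n).foldl (fun r i => r.set i (r.getD i 0 - C.getD k 0)) r) r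
        = r.map (fun v => v - (ks.map (fun k => C.getD k 0)).sum) := by
  induction ks with
  | nil =>
      intro r _
      have h0 : r.map (fun v => v - 0) = r.map id := by
        apply List.map_congr_left; intro x _; simp
      rw [List.foldl_nil, List.map_nil, List.sum_nil, h0, List.map_id]
  | cons k ks ih =>
      intro r hr
      simp only [List.foldl_cons, List.map_cons, List.sum_cons]
      rw [sub_pass_map _ n r hr, ih _ (by simp [hr])]
      rw [List.map_map]
      apply List.map_congr_left
      intro x _
      simp; ring

-- the two multiplication helpers agree on every input
lemma multiplyCyc_eq (A B : List Int) (p : Int) :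
    multiplyCyc A B p = multiplyCycB A B p := by
  simp only [multiplyCyc, multiplyCycB]
  set n := (p - 1).toNat with hn
  by_cases hn0 : n = 0
  · simp [hn0]
  · have hn1 : 1 ≤ n := by omega
    obtain ⟨hClen, hCget⟩ := outer_fill A B n (List.range n) (List.replicate (2 * n - 1) 0)
      (by intro i hi j hj; simp only [List.mem_range] at hi hj; simp; omega)
    set C := (List.range n).foldl (fun C i => (List.range n).foldl (fun C j =>
        C.set (i + j) (C.getD (i + j) 0 + A.getD i 0 * B.getD j 0)) C)
        (List.replicate (2 * n - 1) 0) with hC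
    have hClen' : C.length = 2 * n - 1 := by rw [hClen]; simp
    -- pointwise characterisation of C
    have hCgetD : ∀ m, C.getD m 0 = convB A B n m := by
      intro m
      rw [hCget m, convB_eq_ite_sum]
      have hrep : (List.replicate (2 * n - 1) (0 : Int)).getD m 0 = 0 := by
        simp [List.getD]
      rw [hrep, zero_add]
      apply congrArg
      apply List.map_congr_left
      intro i _
      exact ite_sum_range (fun j => A.getD i 0 * B.getD j 0) i m n
    -- the subtraction phase
    rw [hClen']
    have h2 : 2 * n - 1 - n = n - 1 := by omega
    rw [h2]
    have htake : (C.take n).length ≤ n := by simp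
    rw [sub_passes n C (List.range' n (n - 1)) (C.take n) htake]
    -- compare element-wise with B's map over range n
    have hTeq : ((List.range' n (n - 1)).map (fun k => C.getD k 0)).sum
        = ((List.range' n (n - 1)).map (fun k => convB A B n k)).sum := by
      apply congrArg; apply List.map_congr_left; intro k _; exact hCgetD k
    apply List.ext_getElem
    · simp [hClen']; omega
    · intro i h1' h2'
      simp only [List.length_map, List.length_take, hClen'] at h1'
      have hin : i < n := by omega
      have hitake : i < (C.take n).length := by simp [hClen']; omega
      rw [List.getElem_map, List.getElem_map, List.getElem_range]
      rw [List.getElem_take]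
      have : C[i] = C.getD i 0 := by
        simp [List.getD, List.getElem?_eq_getElem (by omega : i < C.length)]
      rw [this, hCgetD i, hTeq]

-- powLoopA is recB once the helpers are identified
lemma powLoopA_eq_recB (p : Int) :
    ∀ (N : Nat) (e : Int), e.toNat ≤ N → ∀ (r base : List Int),
      powLoopA r base e p = recB r base e p := by
  intro N
  induction N with
  | zero =>
      intro e hN r base
      rw [powLoopA, recB]
      have : ¬ 0 < e := by omega
      simp [this]
  | succ N ih =>
      intro e hN r base
      rw [powLoopA, recB]
      by_cases he : 0 < e
      · simp only [dif_pos he, multiplyCyc_eq]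
        have hdiv : PySem.Int.floordiv e 2 = e / 2 :=
          PySem.Int.floordiv_eq_ediv_of_pos (by norm_num)
        exact ih _ (by rw [hdiv]; omega) _ _
      · simp [he]

-- getD of the identity list 1 :: replicate k 0
lemma id_getD (k i : Nat) :
    ((1 : Int) :: List.replicate k (0 : Int)).getD i 0 = if i = 0 then 1 else 0 := by
  cases i with
  | zero => simp
  | succ i =>
      simp only [List.getD_cons_succ, Nat.succ_ne_zero, if_false]
      simp [List.getD]

-- multiplying the identity on the left truncates to p-1 coefficients
lemma mulB_id (x : List Int) (p : Int)
    (hx : (p - 1).toNat ≤ x.length) :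
    multiplyCycB (1 :: List.replicate ((p - 1).toNat - 1) 0) x p = x.take (p - 1).toNat := by
  simp only [multiplyCycB]
  set n := (p - 1).toNat with hn
  have hconv : ∀ m : Nat, m < n → convB (1 :: List.replicate (n - 1) 0) x n m = x.getD m 0 := by
    intro m hm
    unfold convB
    have hlo : m + 1 - n = 0 := by omega
    have hhi : min n (m + 1) = m + 1 := by omega
    rw [hlo, hhi]
    simp only [Nat.sub_zero]
    have : List.range' 0 (m + 1) = 0 :: List.range' 1 m := by
      rw [List.range'_succ]
    rw [this]
    simp only [List.map_cons, List.sum_cons, id_getD]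
    have hz : ((List.range' 1 m).map (fun i =>
        (if i = 0 then (1 : Int) else 0) * x.getD (m - i) 0)).sum = 0 := by
      apply List.sum_eq_zero
      intro y hy
      simp only [List.mem_map, List.mem_range'_1] at hy
      obtain ⟨i, hi, rfl⟩ := hy
      have : ¬ i = 0 := by omega
      simp [this]
    rw [hz]
    simp
  have hT : ((List.range' n (2 * n - 1 - n)).map
      (fun k => convB (1 :: List.replicate (n - 1) 0) x n k)).sum = 0 := by
    apply List.sum_eq_zero
    intro y hy
    simp only [List.mem_map, List.mem_range'_1] at hy
    obtain ⟨k, hk, rfl⟩ := hy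
    unfold convB
    apply List.sum_eq_zero
    intro z hz
    simp only [List.mem_map, List.mem_range'_1] at hz
    obtain ⟨i, hi, rfl⟩ := hz
    rw [id_getD]
    have : ¬ i = 0 := by omega
    simp [this]
  rw [hT]
  apply List.ext_getElem
  · simp; omega
  · intro i h1 h2
    simp only [List.length_map, List.length_range] at h1
    rw [List.getElem_map, List.getElem_range, List.getElem_take]
    rw [hconv i h1, sub_zero]
    simp [List.getD, List.getElem?_eq_getElem (by omega : i < x.length)]

-- length of B's product is always p-1
lemma mulB_length (A B : List Int) (p : Int) :
    (multiplyCycB A B p).length = (p - 1).toNat := by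
  simp only [multiplyCycB]; simp

-- main loop correspondence: A's fused loop from the identity = strip + seeded recB
lemma loop_eq_strip (p : Int) :
    ∀ (N : Nat) (e : Int), e.toNat ≤ N → 0 < e → ∀ (base : List Int),
      (p - 1).toNat ≤ base.length →
      powLoopA (1 :: List.replicate ((p - 1).toNat - 1) 0) base e p
        = recB ((stripB base e p).1.take (p - 1).toNat)
            (multiplyCycB (stripB base e p).1 (stripB base e p).1 p)
            (PySem.Int.floordiv (stripB base e p).2 2) p := by
  intro N
  induction N with
  | zero => intro e hN he; omega
  | succ N ih =>
      intro e hN he base hbase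
      have hdiv : PySem.Int.floordiv e 2 = e / 2 :=
        PySem.Int.floordiv_eq_ediv_of_pos (by norm_num)
      have hmod : PySem.Int.mod e 2 = e % 2 :=
        PySem.Int.mod_eq_emod_of_pos (by norm_num)
      by_cases hodd : PySem.Int.mod e 2 = 1
      · -- odd: strip stops here; A consumes the bit into the accumulator
        have hstrip : stripB base e p = (base, e) := by
          have hng : ¬ (0 < e ∧ PySem.Int.mod e 2 = 0) := by
            intro ⟨_, h0⟩; rw [h0] at hodd; exact absurd hodd (by norm_num)
          rw [stripB, dif_neg hng]
        rw [hstrip]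
        rw [powLoopA]
        simp only [dif_pos he, if_pos hodd, multiplyCyc_eq]
        rw [mulB_id base p hbase]
        exact powLoopA_eq_recB p (PySem.Int.floordiv e 2).toNat _ le_rfl _ _
      · -- even: both strip one bit
        have hmod0 : PySem.Int.mod e 2 = 0 := by rw [hmod] at hodd ⊢; omega
        have hstrip : stripB base e p
            = stripB (multiplyCycB base base p) (PySem.Int.floordiv e 2) p := by
          rw [stripB, dif_pos ⟨he, hmod0⟩]
        rw [hstrip]
        rw [powLoopA]
        simp only [dif_pos he, if_neg hodd, multiplyCyc_eq]
        have he2 : 0 < e / 2 := by rw [hmod] at hmod0; omega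
        exact ih _ (by rw [hdiv]; omega) (hdiv ▸ he2) _ (by rw [mulB_length])

-- the identity element is the same list in both ports when 2 ≤ p
lemma identity_eq (p : Int) (hp : 2 ≤ p) :
    (List.replicate (p - 1).toNat (0 : Int)).set 0 1
      = 1 :: List.replicate ((p - 1).toNat - 1) (0 : Int) := by
  obtain ⟨m, hm⟩ : ∃ m, (p - 1).toNat = m + 1 := ⟨(p - 1).toNat - 1, by omega⟩
  rw [hm]
  simp [List.replicate_succ]

-- ===== VERDICT (by name: the statement is the Claim_ definition above) =====
theorem power_in_cyclotomic_spec : Claim_equal_power_in_cyclotomic := by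
  intro A exp p _ hpre
  simp only [Spec_power_in_cyclotomic, power_in_cyclotomic, power_in_cyclotomic_alt]
  obtain ⟨hp, hlen⟩ := hpre
  by_cases he : exp ≤ 0
  · rw [powLoopA]
    simp only [dif_neg (by omega : ¬ 0 < exp), if_pos he]
    exact identity_eq p hp
  · simp only [if_neg he]
    rw [identity_eq p hp]
    have hsl : PySem.List.slice (stripB A exp p).1 none (some (p - 1))
        = (stripB A exp p).1.take (p - 1).toNat := by
      have hc : p - 1 = (((p - 1).toNat : Nat) : Int) := by omega
      rw [hc, PySem.List.slice_to_natCast]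
      simp
    rw [hsl]
    exact loop_eq_strip p exp.toNat exp le_rfl (by omega) A (by have := hlen (by omega); omega)
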